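-- pv_equiv track=rewrite | github.com/pollomax847/plex-ratings-sync | auto_playlists_plexamp.py | create_rating_playlists
-- ===== SOURCE A (Python) =====
-- from typing import List, Dict, Optional, Tuple
--
-- def create_rating_playlists(tracks: List[Dict]) -> Dict[str, List[Dict]]:
--     """Crée des playlists par note (5★, 4★, etc.)"""
--     rating_playlists = {}
--
--     for rating in [5, 4, 3, 2, 1]:
--         rated_tracks = [t for t in tracks if t['rating'] == rating * 2]  # Plex utilise 1-10
--         if rated_tracks:
--             playlist_name = f"⭐ {rating} étoiles ({len(rated_tracks)} titres)"
--             rating_playlists[playlist_name] = rated_tracks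
--
--     return rating_playlists
-- ===== SOURCE B (Python) =====
-- def create_rating_playlists(tracks):
--     """Crée des playlists par note (5★, 4★, etc.)"""
--     grouping = {}
--     for t in tracks:
--         grouping.setdefault(t['rating'], []).append(t)
--
--     rating_playlists = {}
--     for rating in (5, 4, 3, 2, 1):
--         lst = grouping.get(rating * 2, [])
--         if lst:
--             rating_playlists[f"⭐ {rating} étoiles ({len(lst)} titres)"] = lst
--     return rating_playlists
-- ===== Notes on version B (the rewrite author's own statement) =====
-- stated objective: faster
-- what changed: One grouping pass over tracks into a dict keyed by rating replaces five separate filtering scans; the output is then emitted from the buckets in fixed 5..1 order.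
import Mathlib
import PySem

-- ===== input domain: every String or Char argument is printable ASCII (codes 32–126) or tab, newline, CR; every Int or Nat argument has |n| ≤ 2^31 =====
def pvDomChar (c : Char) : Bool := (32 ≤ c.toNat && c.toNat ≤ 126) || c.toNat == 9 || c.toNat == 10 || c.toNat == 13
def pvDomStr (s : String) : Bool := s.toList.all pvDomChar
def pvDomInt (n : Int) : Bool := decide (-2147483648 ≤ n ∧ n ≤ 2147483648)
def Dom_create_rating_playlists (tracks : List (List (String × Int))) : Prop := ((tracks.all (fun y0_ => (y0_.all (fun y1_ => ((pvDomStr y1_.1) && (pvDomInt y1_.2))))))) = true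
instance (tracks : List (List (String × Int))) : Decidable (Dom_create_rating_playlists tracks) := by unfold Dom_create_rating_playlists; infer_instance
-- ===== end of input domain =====

-- B groups the tracks by rating in ONE pass over `tracks` and then emits the buckets in
-- fixed 5..1 order, instead of A's five separate filtering scans. Return value only.

-- shared helpers: a track is an association list (a Python dict: duplicate keys keep the
-- last value, hence Dict.ofList), and the playlist name f-string
def ratingOf? (t : List (String × Int)) : Option Int := (PySem.Dict.ofList t).get? "rating"

def pname (rating : Int) (n : Int) : String :=
  "⭐ " ++ PySem.Int.toStr rating ++ " étoiles (" ++ PySem.Int.toStr n ++ " titres)"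

-- ===== PORT A =====
def create_rating_playlists (tracks : List (List (String × Int))) : List (String × List (List (String × Int))) :=
  [5, 4, 3, 2, 1].foldl (fun acc rating =>
    let rated_tracks := tracks.filter (fun t => ratingOf? t == some (rating * 2))
    if rated_tracks.isEmpty then acc
    else acc ++ [(pname rating (rated_tracks.length : Int), rated_tracks)]) []

-- ===== PORT B =====
def create_rating_playlists_alt (tracks : List (List (String × Int))) : List (String × List (List (String × Int))) :=
  let grouping : PySem.Dict Int (List (List (String × Int))) :=
    tracks.foldl (fun d t => d.modify ((ratingOf? t).getD 0) [] (· ++ [t])) PySem.Dict.empty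
  [5, 4, 3, 2, 1].foldl (fun acc rating =>
    let lst := grouping.getD (rating * 2) []
    if lst.isEmpty then acc
    else acc ++ [(pname rating (lst.length : Int), lst)]) []

-- ===== PRECONDITION & SPEC =====
-- Pre_ excludes exactly the tracks lacking a 'rating' key, on which Python A raises KeyError.
def Pre_create_rating_playlists (tracks : List (List (String × Int))) : Prop :=
  ∀ t ∈ tracks, (ratingOf? t).isSome
instance (tracks : List (List (String × Int))) : Decidable (Pre_create_rating_playlists tracks) := by
  unfold Pre_create_rating_playlists; infer_instance
def pvWitness_create_rating_playlists : (List (List (String × Int))) := [[("rating", 10)], [("rating", 4)]]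

def Spec_create_rating_playlists (tracks : List (List (String × Int))) (out : List (String × List (List (String × Int)))) : Prop := out = create_rating_playlists_alt tracks
instance (tracks : List (List (String × Int))) (out : List (String × List (List (String × Int)))) : Decidable (Spec_create_rating_playlists tracks out) := by unfold Spec_create_rating_playlists; infer_instance

-- ===== CLAIM (what is proved, stated in full; the proofs are below) =====
def Claim_equal_create_rating_playlists : Prop := ∀ (tracks : List (List (String × Int))), Dom_create_rating_playlists tracks → Pre_create_rating_playlists tracks → Spec_create_rating_playlists tracks (create_rating_playlists tracks)

-- ===== LEMMAS AND PROOFS =====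

-- the grouping dict's bucket at key c is exactly A's filtered list (under Pre_)
lemma bucket_eq (tracks : List (List (String × Int))) (c : Int)
    (h : ∀ t ∈ tracks, (ratingOf? t).isSome) :
    (tracks.foldl (fun d t => d.modify ((ratingOf? t).getD 0) [] (· ++ [t]))
        PySem.Dict.empty).getD c []
      = tracks.filter (fun t => ratingOf? t == some c) := by
  have hmap : tracks.foldl (fun d t => d.modify ((ratingOf? t).getD 0) [] (· ++ [t]))
        (PySem.Dict.empty : PySem.Dict Int (List (List (String × Int))))
      = (tracks.map (fun t => ((ratingOf? t).getD 0, t))).foldl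
          (fun d p => d.modify p.1 [] (· ++ [p.2])) PySem.Dict.empty := by
    rw [List.foldl_map]
  rw [hmap, PySem.Dict.getD_foldl_modify_append]
  simp only [PySem.Dict.getD_empty, List.nil_append, List.filter_map, List.map_map]
  simp only [Function.comp_def]
  rw [show (fun t : List (String × Int) => (((ratingOf? t).getD 0, t) : Int × List (String × Int)).2) = id from rfl, List.map_id]
  refine List.filter_congr ?_
  intro t ht
  obtain ⟨v, hv⟩ := Option.isSome_iff_exists.mp (h t ht)
  simp [hv]

-- ===== VERDICT (by name: the statement is the Claim_ definition above) =====
theorem create_rating_playlists_spec : Claim_equal_create_rating_playlists := by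
  intro tracks _ hpre
  unfold Spec_create_rating_playlists create_rating_playlists create_rating_playlists_alt
  simp only [bucket_eq _ _ hpre]
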